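-- pv_equiv track=rewrite | github.com/Marco-Meyer/TINF13AIBI-Kinect | Engine/util/__init__.py | string_filter
-- ===== SOURCE A (Python) =====
-- def string_filter(string, start, end):
--     """filter out characters between starts and ends"""
--     level = 0
--     new = ""
--     for c in string:
--         if c == start:level += 1
--         elif c == end:level -=1
--         elif not level:new += c
--     return new
-- ===== SOURCE B (Python) =====
-- def string_filter(string, start, end):
--     """filter out characters between starts and ends"""
--     deltas = [1 if c == start else -1 if c == end else 0 for c in string]
--     levels = []
--     total = 0
--     for d in deltas:
--         total += d
--         levels.append(total)
--     return "".join(c for c, (d, l) in zip(string, zip(deltas, levels)) if d == 0 and l == 0)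
-- ===== Notes on version B (the rewrite author's own statement) =====
-- stated objective: alternative
-- what changed: Replaced the single fused state-machine loop by a three-phase pipeline: map each character to a +1/-1/0 delta, prefix-sum the deltas into nesting levels, then filter/join characters whose delta and running level are both zero.
import Mathlib
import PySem

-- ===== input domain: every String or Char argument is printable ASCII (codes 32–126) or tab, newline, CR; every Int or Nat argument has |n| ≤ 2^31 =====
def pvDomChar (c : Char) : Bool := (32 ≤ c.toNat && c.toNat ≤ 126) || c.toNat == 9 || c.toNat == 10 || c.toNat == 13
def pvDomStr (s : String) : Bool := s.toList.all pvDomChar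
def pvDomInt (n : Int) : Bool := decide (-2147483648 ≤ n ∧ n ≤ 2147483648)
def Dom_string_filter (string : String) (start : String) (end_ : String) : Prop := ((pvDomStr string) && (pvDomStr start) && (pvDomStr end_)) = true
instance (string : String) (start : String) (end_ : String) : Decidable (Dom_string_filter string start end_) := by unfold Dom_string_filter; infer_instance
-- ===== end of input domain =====

-- B replaces A's fused state-machine loop by a delta-map / prefix-sum / filter pipeline (alternative decomposition, same cost).

-- ===== PORT A =====
-- A: one loop carrying (level, new); start/end comparisons are string equality of the 1-char string against start/end_.
def string_filter (string : String) (start : String) (end_ : String) : String :=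
  let r := string.toList.foldl (fun (st : Int × List Char) c =>
    if String.mk [c] == start then (st.1 + 1, st.2)
    else if String.mk [c] == end_ then (st.1 - 1, st.2)
    else if st.1 == 0 then (st.1, st.2 ++ [c]) else st) (0, [])
  String.mk r.2

-- ===== PORT B =====
-- B phase 2: the explicit running-total loop building `levels` from `deltas`.
def pvScan (total : Int) : List Int → List Int
  | [] => []
  | d :: ds => (total + d) :: pvScan (total + d) ds

def string_filter_alt (string : String) (start : String) (end_ : String) : String :=
  let cs := string.toList
  let deltas := cs.map (fun c =>
    if String.mk [c] == start then (1 : Int)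
    else if String.mk [c] == end_ then (-1 : Int) else 0)
  let levels := pvScan 0 deltas
  String.mk ((cs.zip (deltas.zip levels)).filterMap
    (fun p => if p.2.1 == 0 && p.2.2 == 0 then some p.1 else none))

-- ===== PRECONDITION & SPEC =====
def Spec_string_filter (string : String) (start : String) (end_ : String) (out : String) : Prop := out = string_filter_alt string start end_
instance (string : String) (start : String) (end_ : String) (out : String) : Decidable (Spec_string_filter string start end_ out) := by unfold Spec_string_filter; infer_instance

-- ===== CLAIM (what is proved, stated in full; the proofs are below) =====
def Claim_equal_string_filter : Prop := ∀ (string : String) (start : String) (end_ : String), Dom_string_filter string start end_ → Spec_string_filter string start end_ (string_filter string start end_)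

-- ===== LEMMAS AND PROOFS =====

theorem pv_loop_eq (start end_ : String) :
    ∀ (cs : List Char) (L : Int) (acc : List Char),
      (cs.foldl (fun (st : Int × List Char) c =>
        if String.mk [c] == start then (st.1 + 1, st.2)
        else if String.mk [c] == end_ then (st.1 - 1, st.2)
        else if st.1 == 0 then (st.1, st.2 ++ [c]) else st) (L, acc)).2
      = acc ++ ((cs.zip ((cs.map (fun c =>
          if String.mk [c] == start then (1 : Int)
          else if String.mk [c] == end_ then (-1 : Int) else 0)).zip
          (pvScan L (cs.map (fun c =>
            if String.mk [c] == start then (1 : Int)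
            else if String.mk [c] == end_ then (-1 : Int) else 0))))).filterMap
          (fun p => if p.2.1 == 0 && p.2.2 == 0 then some p.1 else none)) := by
  intro cs
  induction cs with
  | nil => intro L acc; simp
  | cons c cs ih =>
    intro L acc
    simp only [List.foldl_cons, List.map_cons, List.zip_cons_cons, pvScan, List.filterMap_cons]
    rcases hb : (String.mk [c] == start) with _ | _
    · rcases hbe : (String.mk [c] == end_) with _ | _
      · simp only [Bool.false_eq_true, if_false, add_zero]
        by_cases hL : L = 0
        · subst hL
          simp only [ih]
          simp
        · have hb0 : (L == (0:Int)) = false := by simp [hL]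
          simp only [hb0, Bool.false_eq_true, if_false, ih]
          simp
      · simp only [Bool.false_eq_true, if_false, if_true, ih]
        simp [sub_eq_add_neg]
    · simp only [if_true, ih]
      simp

-- ===== VERDICT (by name: the statement is the Claim_ definition above) =====
theorem string_filter_spec : Claim_equal_string_filter := by
  intro string start end_ _
  exact congrArg String.mk (pv_loop_eq start end_ string.toList 0 [])
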